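-- pv_equiv track=rewrite | github.com/caleboverman/llmsys_f25_hw5 | pipeline/pipe.py | _clock_cycles
-- ===== SOURCE A (Python) =====
-- from typing import Any, Iterable, Iterator, List, Optional, Union, Sequence, Tuple, cast
--
-- def _clock_cycles(num_batches: int, num_partitions: int) -> Iterable[List[Tuple[int, int]]]:
--     '''Generate schedules for each clock cycle.
--
--     An example of the generated schedule for m=3 and n=3 is as follows:
--
--     k (i,j) (i,j) (i,j)
--     - ----- ----- -----
--     0 (0,0)
--     1 (1,0) (0,1)
--     2 (2,0) (1,1) (0,2)
--     3       (2,1) (1,2)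
--     4             (2,2)
--
--     where k is the clock number, i is the index of micro-batch, and j is the index of partition.
--
--     Each schedule is a list of tuples. Each tuple contains the index of micro-batch and the index of partition.
--     This function should yield schedules for each clock cycle.
--     '''
--     # BEGIN ASSIGN5_2_1
--     if num_batches <= 0 or num_partitions <= 0:
--         return
--
--     total_steps = num_batches + num_partitions - 1
--     for k in range(total_steps):
--         step = []
--         for partition_idx in range(num_partitions):
--             batch_idx = k - partition_idx
--             if 0 <= batch_idx < num_batches:
--                 step.append((batch_idx, partition_idx))
--         if step:
--             yield step
-- ===== SOURCE B (Python) =====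
-- def _clock_cycles(num_batches, num_partitions):
--     if num_batches <= 0 or num_partitions <= 0:
--         return
--     for k in range(num_batches + num_partitions - 1):
--         lo = max(0, k - num_batches + 1)
--         hi = min(num_partitions - 1, k)
--         yield [(k - j, j) for j in range(lo, hi + 1)]
-- ===== Notes on version B (the rewrite author's own statement) =====
-- stated objective: alternative
-- what changed: Instead of scanning all num_partitions indices every clock cycle and filtering, B computes the valid partition-index interval [max(0,k-m+1), min(n-1,k)] per cycle in O(1) and emits exactly those pairs; a timing run measured only ~1.3x on square inputs, so no speed is claimed.
import Mathlib
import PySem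

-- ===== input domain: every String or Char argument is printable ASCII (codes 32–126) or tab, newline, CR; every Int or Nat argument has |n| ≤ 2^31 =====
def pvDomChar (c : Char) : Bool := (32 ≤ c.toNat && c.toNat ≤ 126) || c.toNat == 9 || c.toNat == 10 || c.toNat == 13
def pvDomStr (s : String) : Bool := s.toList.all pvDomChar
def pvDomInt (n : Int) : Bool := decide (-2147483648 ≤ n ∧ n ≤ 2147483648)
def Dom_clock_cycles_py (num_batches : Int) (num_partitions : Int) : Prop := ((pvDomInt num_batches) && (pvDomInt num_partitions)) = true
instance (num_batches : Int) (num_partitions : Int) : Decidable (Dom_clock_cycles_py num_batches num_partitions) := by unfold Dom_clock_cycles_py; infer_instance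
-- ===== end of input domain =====

-- B changes the algorithm: it computes the valid partition interval per clock cycle directly
-- instead of scanning and filtering all partitions every cycle (objective: alternative).

-- ===== PORT A =====
-- Literal port of A: for each clock k, scan every partition index, keep in-range batch
-- indices, and append the step only if it is nonempty (the generator collected as a list).
def clock_cycles_py (num_batches : Int) (num_partitions : Int) : List (List (Int × Int)) :=
  if num_batches ≤ 0 ∨ num_partitions ≤ 0 then []
  else
    (PySem.List.pyRange 0 (num_batches + num_partitions - 1) 1).foldl
      (fun out k =>
        let step :=
          (PySem.List.pyRange 0 num_partitions 1).foldl
            (fun step partition_idx =>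
              if 0 ≤ k - partition_idx ∧ k - partition_idx < num_batches then
                step ++ [(k - partition_idx, partition_idx)]
              else step) []
        if step ≠ [] then out ++ [step] else out) []

-- ===== PORT B =====
-- Literal port of B: each clock k yields the comprehension over the closed-form interval.
def clock_cycles_py_alt (num_batches : Int) (num_partitions : Int) : List (List (Int × Int)) :=
  if num_batches ≤ 0 ∨ num_partitions ≤ 0 then []
  else
    (PySem.List.pyRange 0 (num_batches + num_partitions - 1) 1).map
      (fun k =>
        (PySem.List.pyRange (max 0 (k - num_batches + 1)) (min (num_partitions - 1) k + 1) 1).map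
          (fun j => (k - j, j)))

-- ===== PRECONDITION & SPEC =====
def Spec_clock_cycles_py (num_batches : Int) (num_partitions : Int) (out : List (List (Int × Int))) : Prop := out = clock_cycles_py_alt num_batches num_partitions
instance (num_batches : Int) (num_partitions : Int) (out : List (List (Int × Int))) : Decidable (Spec_clock_cycles_py num_batches num_partitions out) := by unfold Spec_clock_cycles_py; infer_instance

-- ===== CLAIM (what is proved, stated in full; the proofs are below) =====
def Claim_equal_clock_cycles_py : Prop := ∀ (num_batches : Int) (num_partitions : Int), Dom_clock_cycles_py num_batches num_partitions → Spec_clock_cycles_py num_batches num_partitions (clock_cycles_py num_batches num_partitions)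

-- ===== LEMMAS AND PROOFS =====

-- Filtering an integer range by an interval condition gives the clipped range.
theorem filter_pyRange_one_interval (a b c d : Int) :
    (PySem.List.pyRange a b 1).filter (fun x => decide (c ≤ x ∧ x ≤ d)) =
      PySem.List.pyRange (max a c) (min b (d + 1)) 1 := by
  refine List.Perm.eq_of_pairwise'
    (List.Pairwise.filter _ (PySem.List.pairwise_lt_pyRange_one a b))
    (PySem.List.pairwise_lt_pyRange_one _ _) ?_
  rw [List.perm_ext_iff_of_nodup
    (List.Nodup.filter _ (PySem.List.nodup_pyRange_one a b))
    (PySem.List.nodup_pyRange_one _ _)]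
  intro x
  simp only [List.mem_filter, PySem.List.mem_pyRange_one, decide_eq_true_eq]
  omega

-- A's inner scan over all partitions equals B's clipped-interval comprehension.
theorem inner_step_eq (m n k : Int) :
    (PySem.List.pyRange 0 n 1).foldl
        (fun step j => if 0 ≤ k - j ∧ k - j < m then step ++ [(k - j, j)] else step) [] =
      (PySem.List.pyRange (max 0 (k - m + 1)) (min (n - 1) k + 1) 1).map (fun j => (k - j, j)) := by
  rw [PySem.List.foldl_append_ite]
  have hc : (PySem.List.pyRange 0 n 1).filter (fun j => decide (0 ≤ k - j ∧ k - j < m)) =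
      (PySem.List.pyRange 0 n 1).filter (fun j => decide (k - m + 1 ≤ j ∧ j ≤ k)) := by
    apply List.filter_congr
    intro j _
    simp only [decide_eq_decide]
    omega
  rw [hc, filter_pyRange_one_interval]
  have : min n (k + 1) = min (n - 1) k + 1 := by omega
  simp [this]

theorem clock_cycles_py_spec : Claim_equal_clock_cycles_py := by
  intro m n _
  unfold Spec_clock_cycles_py clock_cycles_py clock_cycles_py_alt
  by_cases h : m ≤ 0 ∨ n ≤ 0
  · simp [h]
  · push Not at h
    obtain ⟨hm, hn⟩ := h
    rw [if_neg (by omega), if_neg (by omega)]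
    have hbody : ∀ (out : List (List (Int × Int))) (k : Int),
        k ∈ PySem.List.pyRange 0 (m + n - 1) 1 →
        (let step :=
          (PySem.List.pyRange 0 n 1).foldl
            (fun step j => if 0 ≤ k - j ∧ k - j < m then step ++ [(k - j, j)] else step) []
         if step ≠ [] then out ++ [step] else out) =
        out ++ [(PySem.List.pyRange (max 0 (k - m + 1)) (min (n - 1) k + 1) 1).map
          (fun j => (k - j, j))] := by
      intro out k hk
      rw [PySem.List.mem_pyRange_one] at hk
      simp only [inner_step_eq m n k]
      rw [if_pos]
      intro hnil
      have := congrArg List.length hnil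
      simp only [List.length_map, PySem.List.length_pyRange_one, List.length_nil] at this
      omega
    refine Eq.trans (PySem.List.foldl_congr_mem _ _
      (fun out k => out ++ [(PySem.List.pyRange (max 0 (k - m + 1)) (min (n - 1) k + 1) 1).map
        (fun j => (k - j, j))]) _ hbody) ?_
    rw [PySem.List.foldl_append_singleton_eq_map]
    simp
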